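-- pv_equiv track=rewrite | github.com/xy2333/Leetcode | leetcode/2019拼多多笔试.py | rec
-- ===== SOURCE A (Python) =====
-- def rec(lst):
-- 	if len(lst) == 1:
-- 		if lst[0][0] == lst[0][-1]:
-- 			return 'true'
-- 		else:
-- 			return 'false'
-- 	else:
-- 		for i in range(1,len(lst)):
-- 			if lst[i][0] == lst[0][-1]:
-- 				lst[0] = lst[0][0]+lst[i][-1]
-- 				lst.pop(i)
-- 				return rec(lst)
-- 			elif lst[i][-1] == lst[0][0]:
-- 				lst[0] = lst[i][0] +lst[0][-1]
-- 				lst.pop(i)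
-- 				return rec(lst)
--
-- 		return 'false'
-- ===== SOURCE B (Python) =====
-- def rec(lst):
--     # Index-based greedy: reduce each piece to its (first,last) chars, bucket the
--     # candidate piece indices per start-char and per end-char (descending, so the
--     # smallest index sits at the end), and repeatedly take the minimum-index piece
--     # that extends the chain, with lazy deletion via a dead set.
--     if not lst:
--         return 'false'
--     pairs = [(t[0], t[-1]) for t in lst]
--     by_start = {}
--     by_end = {}
--     for i in range(len(pairs) - 1, 0, -1):
--         by_start.setdefault(pairs[i][0], []).append(i)
--         by_end.setdefault(pairs[i][1], []).append(i)
--     dead = set()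
--     s, e = pairs[0]
--     remaining = len(pairs) - 1
--     while remaining:
--         fwd = by_start.get(e, [])
--         while fwd and fwd[-1] in dead:
--             fwd.pop()
--         bwd = by_end.get(s, [])
--         while bwd and bwd[-1] in dead:
--             bwd.pop()
--         if fwd and (not bwd or fwd[-1] <= bwd[-1]):
--             i = fwd.pop()
--             e = pairs[i][1]
--         elif bwd:
--             i = bwd.pop()
--             s = pairs[i][0]
--         else:
--             return 'false'
--         dead.add(i)
--         remaining -= 1
--     return 'true' if s == e else 'false'
-- ===== Notes on version B (the rewrite author's own statement) =====
-- stated objective: faster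
-- what changed: replaced the recursive rescan-from-the-front greedy (which re-scans and mutates the list each round) by a single-pass index structure: pieces reduced once to (first,last) char pairs, bucketed per start-char and per end-char in descending index lists, and each round the minimum matching index is read off the two bucket tails with lazy dead-set deletion
import Mathlib
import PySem

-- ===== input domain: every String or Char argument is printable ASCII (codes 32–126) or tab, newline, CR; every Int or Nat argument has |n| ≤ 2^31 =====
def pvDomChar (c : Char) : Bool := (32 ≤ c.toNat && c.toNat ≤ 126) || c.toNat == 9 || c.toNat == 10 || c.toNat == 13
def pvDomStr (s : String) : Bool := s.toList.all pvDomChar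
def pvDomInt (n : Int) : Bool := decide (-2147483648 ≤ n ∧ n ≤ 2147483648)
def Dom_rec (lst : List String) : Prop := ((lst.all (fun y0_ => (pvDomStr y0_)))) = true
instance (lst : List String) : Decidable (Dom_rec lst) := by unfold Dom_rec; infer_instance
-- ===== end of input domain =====

-- B replaces A's recursive rescan-and-mutate greedy by per-character index buckets with
-- lazy deletion (objective: faster). A mutates its argument list in place; B does not —
-- the equivalence proved here is about the RETURN value only.

-- ===== PORT A =====
-- s[0] / s[-1]; exact for nonempty s (Pre_rec excludes lists containing "")
def fcA (s : String) : Char := (PySem.Str.pyGet? s 0).getD ' '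
def lcA (s : String) : Char := (PySem.Str.pyGet? s (-1)).getD ' '

-- the 'for i in range(1, len(lst))' scan: first piece x with x[0] == head[-1]
-- (then head becomes head[0]+x[-1]) or x[-1] == head[0] (then head becomes x[0]+head[-1]);
-- returns the new head and the list with x popped, or none when the loop falls through.
def scanA (h : String) : List String → Option (String × List String)
  | [] => none
  | x :: xs =>
    if fcA x = lcA h then some (String.ofList [fcA h, lcA x], xs)
    else if lcA x = fcA h then some (String.ofList [fcA x, lcA h], xs)
    else match scanA h xs with
      | some (h', r) => some (h', x :: r)
      | none => none

theorem scanA_length (h : String) (l : List String) (h' : String) (r : List String)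
    (hs : scanA h l = some (h', r)) : r.length + 1 = l.length := by
  induction l generalizing r with
  | nil => simp [scanA] at hs
  | cons x xs ih =>
    simp only [scanA] at hs
    split_ifs at hs with h1 h2
    · cases hs; rfl
    · cases hs; rfl
    · cases hrec : scanA h xs with
      | none => rw [hrec] at hs; cases hs
      | some p =>
        rw [hrec] at hs
        cases p with
        | mk a b => cases hs; simp [← ih b hrec]

def rec (lst : List String) : String :=
  match lst with
  | [] => "false"                                    -- empty loop range: 'false'
  | [t] => if fcA t = lcA t then "true" else "false"
  | h :: rest =>
    match hs : scanA h rest with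
    | some (h', rest') => rec (h' :: rest')
    | none => "false"
termination_by lst.length
decreasing_by
  have := scanA_length h rest h' rest' hs
  simp_wf; omega

-- ===== PORT B =====
def fcB (s : String) : Char := (PySem.Str.pyGet? s 0).getD ' '
def lcB (s : String) : Char := (PySem.Str.pyGet? s (-1)).getD ' '

-- pairs = [(t[0], t[-1]) for t in lst]
def pairsB (lst : List String) : List (Char × Char) := lst.map (fun t => (fcB t, lcB t))

-- pairs[i] for an index the algorithm keeps in range
def pAtB (pairs : List (Char × Char)) (i : Nat) : Char × Char := pairs.getD i (' ', ' ')

-- range(len(pairs)-1, 0, -1)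
def ridxB (n : Nat) : List Nat := ((List.range n).drop 1).reverse

-- the build loop: by_start.setdefault(c, []).append(i); by_end.setdefault(c, []).append(i)
def bucketsB (pairs : List (Char × Char)) :
    PySem.Dict Char (List Nat) × PySem.Dict Char (List Nat) :=
  (ridxB pairs.length).foldl
    (fun d i => (d.1.modify (pAtB pairs i).1 [] (· ++ [i]), d.2.modify (pAtB pairs i).2 [] (· ++ [i])))
    (PySem.Dict.empty, PySem.Dict.empty)

theorem pruneB_dec (xs : List Nat) (h : ¬ xs = []) : xs.dropLast.length < xs.length := by
  have := List.length_pos_iff.mpr h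
  simp [List.length_dropLast]; omega

-- 'while xs and xs[-1] in dead: xs.pop()'
def pruneB (dead : PySem.Set Nat) (xs : List Nat) : List Nat :=
  if h : xs = [] then xs
  else if PySem.Set.contains dead (xs.getLast h) then pruneB dead xs.dropLast else xs
termination_by xs.length
decreasing_by exact pruneB_dec xs h

-- the 'while remaining:' loop (fuel = remaining)
def loopB (pairs : List (Char × Char)) (bs be : PySem.Dict Char (List Nat))
    (dead : PySem.Set Nat) (s e : Char) : Nat → String
  | 0 => if s = e then "true" else "false"
  | r + 1 =>
    let fwd := pruneB dead (bs.getD e [])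
    let bwd := pruneB dead (be.getD s [])
    match fwd.getLast?, bwd.getLast? with
    | some i, some j =>
      if i ≤ j then
        loopB pairs (bs.insert e fwd.dropLast) (be.insert s bwd) (PySem.Set.add dead i) s (pAtB pairs i).2 r
      else
        loopB pairs (bs.insert e fwd) (be.insert s bwd.dropLast) (PySem.Set.add dead j) (pAtB pairs j).1 e r
    | some i, none =>
      loopB pairs (bs.insert e fwd.dropLast) (be.insert s bwd) (PySem.Set.add dead i) s (pAtB pairs i).2 r
    | none, some j =>
      loopB pairs (bs.insert e fwd) (be.insert s bwd.dropLast) (PySem.Set.add dead j) (pAtB pairs j).1 e r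
    | none, none => "false"

def rec_alt (lst : List String) : String :=
  match lst with
  | [] => "false"
  | _ :: _ =>
    let pairs := pairsB lst
    loopB pairs (bucketsB pairs).1 (bucketsB pairs).2 PySem.Set.empty
      (pAtB pairs 0).1 (pAtB pairs 0).2 (pairs.length - 1)

-- ===== PRECONDITION & SPEC =====
-- Pre_rec excludes exactly the lists containing an empty string, on which A raises IndexError.
def Pre_rec (lst : List String) : Prop := ∀ s ∈ lst, s ≠ ""
instance (lst : List String) : Decidable (Pre_rec lst) := by unfold Pre_rec; infer_instance
def pvWitness_rec : List String := ["ab", "ba"]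

def Spec_rec (lst : List String) (out : String) : Prop := out = rec_alt lst
instance (lst : List String) (out : String) : Decidable (Spec_rec lst out) := by unfold Spec_rec; infer_instance

-- ===== CLAIM (what is proved, stated in full; the proofs are below) =====
def Claim_equal_rec : Prop := ∀ (lst : List String), Dom_rec lst → Pre_rec lst → Spec_rec lst (rec lst)

-- ===== LEMMAS AND PROOFS =====

-- the common reference: greedy on (start,end) char pairs
def scanP (s e : Char) : List (Char × Char) → Option (Char × Char × List (Char × Char))
  | [] => none
  | (a, b) :: xs =>
    if a = e then some (s, b, xs)
    else if b = s then some (a, e, xs)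
    else (scanP s e xs).map (fun t => (t.1, t.2.1, (a, b) :: t.2.2))

theorem scanP_length (s e : Char) (l : List (Char × Char)) (t : Char × Char × List (Char × Char))
    (hs : scanP s e l = some t) : t.2.2.length + 1 = l.length := by
  induction l generalizing t with
  | nil => simp [scanP] at hs
  | cons x xs ih =>
    obtain ⟨a, b⟩ := x
    simp only [scanP] at hs
    split_ifs at hs with h1 h2
    · cases hs; rfl
    · cases hs; rfl
    · cases hrec : scanP s e xs with
      | none => rw [hrec] at hs; cases hs
      | some p => rw [hrec] at hs; cases hs; simpa using ih p hrec

def refLoop (s e : Char) : List (Char × Char) → String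
  | [] => if s = e then "true" else "false"
  | x :: xs =>
    match hs : scanP s e (x :: xs) with
    | some (s', e', r) => refLoop s' e' r
    | none => "false"
termination_by l => l.length
decreasing_by
  have := scanP_length s e (x :: xs) (s', e', r) hs
  simp_wf
  simp at this
  omega


-- equation lemmas for the WF-defined functions
theorem refLoop_nil (s e : Char) : refLoop s e [] = if s = e then "true" else "false" := by
  rw [refLoop]

theorem refLoop_cons_some (s e : Char) (x : Char × Char) (xs : List (Char × Char))
    (s' e' : Char) (r : List (Char × Char)) (h : scanP s e (x :: xs) = some (s', e', r)) :
    refLoop s e (x :: xs) = refLoop s' e' r := by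
  rw [refLoop]
  split
  · rename_i heq; rw [h] at heq; cases heq; rfl
  · rename_i heq; rw [h] at heq; cases heq

theorem refLoop_cons_none (s e : Char) (x : Char × Char) (xs : List (Char × Char))
    (h : scanP s e (x :: xs) = none) : refLoop s e (x :: xs) = "false" := by
  rw [refLoop]
  split
  · rename_i heq; rw [h] at heq; cases heq
  · rfl

theorem rec_one (t : String) : rec [t] = if fcA t = lcA t then "true" else "false" := by
  rw [rec]

theorem rec_cons2_some (h x : String) (xs : List String) (h' : String) (rest' : List String)
    (hs : scanA h (x :: xs) = some (h', rest')) : rec (h :: x :: xs) = rec (h' :: rest') := by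
  rw [rec]
  split
  · rename_i heq; rw [hs] at heq; cases heq; rfl
  · rename_i heq; rw [hs] at heq; cases heq
  · simp

theorem rec_cons2_none (h x : String) (xs : List String)
    (hs : scanA h (x :: xs) = none) : rec (h :: x :: xs) = "false" := by
  rw [rec]
  split
  · rename_i heq; rw [hs] at heq; cases heq
  · rfl
  · simp

-- ---------- A-side: rec = refLoop on the (first,last) pairs ----------

theorem fcA_ofList (a b : Char) : fcA (String.ofList [a, b]) = a := by
  simp [fcA]

theorem lcA_ofList (a b : Char) : lcA (String.ofList [a, b]) = b := by
  simp [lcA, PySem.List.pyGet?_neg_one]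

theorem scanA_scanP (h : String) (l : List String) :
    (scanA h l).map (fun p => ((fcA p.1, lcA p.1), p.2.map (fun t => (fcA t, lcA t))))
      = (scanP (fcA h) (lcA h) (l.map (fun t => (fcA t, lcA t)))).map
          (fun t => ((t.1, t.2.1), t.2.2)) := by
  induction l with
  | nil => simp [scanA, scanP]
  | cons x xs ih =>
    simp only [scanA, List.map_cons, scanP]
    split_ifs with h1 h2
    · simp [fcA_ofList, lcA_ofList]
    · simp [fcA_ofList, lcA_ofList]
    · cases hA : scanA h xs with
      | none =>
        rw [hA] at ih
        cases hP : scanP (fcA h) (lcA h) (xs.map (fun t => (fcA t, lcA t))) with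
        | none => simp [hA, hP]
        | some p => rw [hP] at ih; simp at ih
      | some p =>
        rw [hA] at ih
        cases hP : scanP (fcA h) (lcA h) (xs.map (fun t => (fcA t, lcA t))) with
        | none => rw [hP] at ih; simp at ih
        | some q =>
          rw [hP] at ih
          simp only [Option.map_some, Option.some.injEq, Prod.mk.injEq] at ih
          simp only [hA, hP, Option.map_some, Option.some.injEq, Prod.mk.injEq,
            List.map_cons]
          exact ⟨⟨ih.1.1, ih.1.2⟩, by rw [ih.2]⟩

theorem rec_eq_ref : ∀ (n : Nat) (h : String) (rest : List String), rest.length = n →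
    rec (h :: rest) = refLoop (fcA h) (lcA h) (rest.map (fun t => (fcA t, lcA t))) := by
  intro n
  induction n using Nat.strong_induction_on with
  | _ n ih =>
    intro h rest hn
    match rest with
    | [] => simp [rec_one, refLoop_nil]
    | x :: xs =>
      have hsc := scanA_scanP h (x :: xs)
      cases hA : scanA h (x :: xs) with
      | none =>
        rw [hA] at hsc
        cases hP : scanP (fcA h) (lcA h) ((x :: xs).map (fun t => (fcA t, lcA t))) with
        | none =>
          rw [rec_cons2_none h x xs hA]
          rw [List.map_cons] at hP ⊢
          rw [refLoop_cons_none _ _ _ _ hP]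
        | some p => rw [hP] at hsc; simp at hsc
      | some p =>
        obtain ⟨h', rest'⟩ := p
        rw [hA] at hsc
        cases hP : scanP (fcA h) (lcA h) ((x :: xs).map (fun t => (fcA t, lcA t))) with
        | none => rw [hP] at hsc; simp at hsc
        | some q =>
          obtain ⟨s', e', r'⟩ := q
          rw [hP] at hsc
          simp only [Option.map_some, Option.some.injEq, Prod.mk.injEq] at hsc
          rw [rec_cons2_some h x xs h' rest' hA]
          rw [List.map_cons] at hP ⊢
          rw [refLoop_cons_some _ _ _ _ _ _ _ hP]
          have hlen := scanA_length h (x :: xs) h' rest' hA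
          obtain ⟨⟨hs', he'⟩, hr'⟩ := hsc
          rw [← hs', ← he', ← hr']
          exact ih rest'.length (by simp at hlen hn; omega) h' rest' rfl

-- ---------- B-side ----------

-- ascending list of still-alive candidate indices 1..n-1
def aliveL (n : Nat) (dead : List Nat) : List Nat :=
  ((List.range n).drop 1).filter (fun i => !(dead.contains i))

-- invariant of one bucket list: strictly descending, all in range with the right
-- projected char, and containing every still-alive index with that char
def GoodList (pairs : List (Char × Char)) (dead : List Nat) (proj : Char × Char → Char)
    (c : Char) (L : List Nat) : Prop :=
  L.Pairwise (· > ·) ∧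
  (∀ i ∈ L, 1 ≤ i ∧ i < pairs.length ∧ proj (pAtB pairs i) = c) ∧
  (∀ i, 1 ≤ i → i < pairs.length → i ∉ dead → proj (pAtB pairs i) = c → i ∈ L)

theorem mem_aliveL (n : Nat) (dead : List Nat) (i : Nat) :
    i ∈ aliveL n dead ↔ 1 ≤ i ∧ i < n ∧ i ∉ dead := by
  simp only [aliveL, List.mem_filter, List.range_eq_range', List.drop_range', List.mem_range',
    List.contains_eq_mem, Bool.not_eq_eq_eq_not, Bool.not_true, decide_eq_false_iff_not]
  constructor
  · rintro ⟨⟨k, hk, rfl⟩, hd⟩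
    exact ⟨by omega, by omega, hd⟩
  · rintro ⟨h1, h2, hd⟩
    exact ⟨⟨i - 1, by omega, by omega⟩, hd⟩

theorem aliveL_pairwise (n : Nat) (dead : List Nat) : (aliveL n dead).Pairwise (· < ·) := by
  exact List.Pairwise.filter _ (List.Pairwise.sublist (List.drop_sublist 1 _) List.pairwise_lt_range)

theorem aliveL_add (n : Nat) (dead : List Nat) (i : Nat) :
    aliveL n (dead ++ [i]) = (aliveL n dead).filter (fun j => j != i) := by
  unfold aliveL
  rw [List.filter_filter]
  apply List.filter_congr
  intro j hj
  by_cases h1 : j = i <;> by_cases h2 : j ∈ dead <;>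
    simp [h1, h2, List.contains_eq_mem]

theorem length_filter_ne (l : List Nat) (i : Nat) (hnd : l.Nodup) (hi : i ∈ l) :
    (l.filter (fun j => j != i)).length + 1 = l.length := by
  have he := List.Nodup.erase_eq_filter hnd i
  have hl := List.length_erase_of_mem hi
  have hp := List.length_pos_of_mem hi
  rw [he] at hl
  omega

theorem pruneB_nil (dead : PySem.Set Nat) : pruneB dead [] = [] := by
  rw [pruneB]; simp

theorem pruneB_concat (dead : PySem.Set Nat) (xs : List Nat) (x : Nat) :
    pruneB dead (xs ++ [x]) = if x ∈ dead then pruneB dead xs else xs ++ [x] := by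
  rw [pruneB]
  have hne : xs ++ [x] ≠ [] := by simp
  simp only [dif_neg hne, List.getLast_concat, List.dropLast_concat,
    PySem.Set.contains_eq_listContains, List.contains_eq_mem]
  by_cases hx : x ∈ dead <;> simp [hx]

theorem pruneB_sublist (dead : PySem.Set Nat) (L : List Nat) : List.Sublist (pruneB dead L) L := by
  induction L using List.reverseRecOn with
  | nil => rw [pruneB_nil]
  | append_singleton xs x ih =>
    rw [pruneB_concat]
    by_cases hx : x ∈ dead
    · simpa [hx] using ih.trans (List.sublist_append_left xs [x])
    · simp [hx]

theorem pruneB_mem (dead : PySem.Set Nat) (L : List Nat) (i : Nat)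
    (hi : i ∈ L) (hd : i ∉ dead) : i ∈ pruneB dead L := by
  induction L using List.reverseRecOn with
  | nil => simp at hi
  | append_singleton xs x ih =>
    rw [pruneB_concat]
    by_cases hx : x ∈ dead
    · simp only [if_pos hx]
      rcases List.mem_append.mp hi with h | h
      · exact ih h
      · simp at h; exact absurd (h ▸ hx) hd
    · simp only [if_neg hx]; exact hi

theorem pruneB_none (dead : PySem.Set Nat) (L : List Nat)
    (h : (pruneB dead L).getLast? = none) : ∀ i ∈ L, i ∈ dead := by
  induction L using List.reverseRecOn with
  | nil => simp
  | append_singleton xs x ih =>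
    rw [pruneB_concat] at h
    by_cases hx : x ∈ dead
    · rw [if_pos hx] at h
      intro i hi
      rcases List.mem_append.mp hi with h' | h'
      · exact ih h i h'
      · simp at h'; exact h' ▸ hx
    · rw [if_neg hx] at h
      simp [List.getLast?_concat] at h

theorem pruneB_some (dead : PySem.Set Nat) (L : List Nat) (i : Nat)
    (h : (pruneB dead L).getLast? = some i) : i ∈ L ∧ i ∉ dead := by
  induction L using List.reverseRecOn with
  | nil => rw [pruneB_nil] at h; simp at h
  | append_singleton xs x ih =>
    rw [pruneB_concat] at h
    by_cases hx : x ∈ dead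
    · rw [if_pos hx] at h
      obtain ⟨h1, h2⟩ := ih h
      exact ⟨List.mem_append.mpr (Or.inl h1), h2⟩
    · rw [if_neg hx] at h
      rw [List.getLast?_concat] at h
      cases h
      exact ⟨by simp, hx⟩

theorem getLast_min (L : List Nat) (i : Nat) (hL : L.Pairwise (· > ·))
    (h : L.getLast? = some i) : ∀ j ∈ L, i ≤ j := by
  induction L using List.reverseRecOn with
  | nil => simp at h
  | append_singleton xs x ih =>
    rw [List.getLast?_concat] at h
    cases h
    intro j hj
    rcases List.mem_append.mp hj with h' | h'
    · have := (List.pairwise_append.mp hL).2.2 j h' i (by simp)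
      omega
    · simp at h'; omega

theorem pruneB_min (dead : PySem.Set Nat) (L : List Nat) (i j : Nat) (hL : L.Pairwise (· > ·))
    (h : (pruneB dead L).getLast? = some i) (hj : j ∈ L) (hjd : j ∉ dead) : i ≤ j := by
  exact getLast_min _ i (List.Pairwise.sublist (pruneB_sublist dead L) hL) h j
    (pruneB_mem dead L j hj hjd)

theorem pruneB_dropLast_mem (dead : PySem.Set Nat) (L : List Nat) (i j : Nat)
    (h : (pruneB dead L).getLast? = some i) (hj : j ∈ L) (hjd : j ∉ dead) (hne : j ≠ i) :
    j ∈ (pruneB dead L).dropLast := by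
  have hne' : pruneB dead L ≠ [] := by
    intro hcon; rw [hcon] at h; simp at h
  have hlast : (pruneB dead L).getLast hne' = i := by
    have := List.getLast?_eq_getLast (l := pruneB dead L) hne'
    rw [h] at this; exact (Option.some.inj this).symm
  have hmem : j ∈ pruneB dead L := pruneB_mem dead L j hj hjd
  rw [← List.dropLast_concat_getLast hne'] at hmem
  rcases List.mem_append.mp hmem with h' | h'
  · exact h'
  · simp [hlast] at h'; exact absurd h' hne

theorem GoodList_pruneB (pairs : List (Char × Char)) (dead : List Nat)
    (proj : Char × Char → Char) (c : Char) (L : List Nat)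
    (hG : GoodList pairs dead proj c L) : GoodList pairs dead proj c (pruneB dead L) := by
  obtain ⟨h1, h2, h3⟩ := hG
  refine ⟨List.Pairwise.sublist (pruneB_sublist dead L) h1, ?_, ?_⟩
  · intro i hi
    exact h2 i ((pruneB_sublist dead L).subset hi)
  · intro i ha hb hc hd
    exact pruneB_mem dead L i (h3 i ha hb hc hd) hc

theorem GoodList_mono (pairs : List (Char × Char)) (dead dead' : List Nat)
    (proj : Char × Char → Char) (c : Char) (L : List Nat)
    (hsub : ∀ i, i ∈ dead → i ∈ dead')
    (hG : GoodList pairs dead proj c L) : GoodList pairs dead' proj c L := by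
  obtain ⟨h1, h2, h3⟩ := hG
  exact ⟨h1, h2, fun i ha hb hc hd => h3 i ha hb (fun hcon => hc (hsub i hcon)) hd⟩

theorem GoodList_pop (pairs : List (Char × Char)) (dead : List Nat)
    (proj : Char × Char → Char) (c : Char) (L : List Nat) (i : Nat)
    (hG : GoodList pairs dead proj c L) (h : (pruneB dead L).getLast? = some i) :
    GoodList pairs (dead ++ [i]) proj c ((pruneB dead L).dropLast) := by
  obtain ⟨h1, h2, h3⟩ := hG
  have hsub : List.Sublist ((pruneB dead L).dropLast) L :=
    (List.dropLast_sublist _).trans (pruneB_sublist dead L)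
  refine ⟨List.Pairwise.sublist hsub h1, ?_, ?_⟩
  · intro j hj
    exact h2 j (hsub.subset hj)
  · intro j ha hb hc hd
    have hjd : j ∉ dead := fun hcon => hc (List.mem_append.mpr (Or.inl hcon))
    have hji : j ≠ i := by
      intro hcon; exact hc (List.mem_append.mpr (Or.inr (by simp [hcon])))
    exact pruneB_dropLast_mem dead L i j h (h3 j ha hb hjd hd) hjd hji

-- scanP on a mapped ascending index list: none when nothing matches
theorem scanP_none_of (s e : Char) (f : Nat → Char × Char) (al : List Nat)
    (h : ∀ i ∈ al, (f i).1 ≠ e ∧ (f i).2 ≠ s) : scanP s e (al.map f) = none := by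
  induction al with
  | nil => simp [scanP]
  | cons a al' ih =>
    obtain ⟨h1, h2⟩ := h a (by simp)
    rcases hfa : f a with ⟨c1, c2⟩
    rw [hfa] at h1 h2
    simp only [List.map_cons, hfa, scanP, if_neg h1, if_neg h2]
    rw [ih (fun i hi => h i (by simp [hi]))]
    rfl

-- scanP on a mapped ascending index list picks the minimum matching index,
-- preferring the forward (start-char) rule there
theorem scanP_min (s e : Char) (f : Nat → Char × Char) (al : List Nat) (i : Nat)
    (hasc : al.Pairwise (· < ·)) (hi : i ∈ al)
    (hm : (f i).1 = e ∨ (f i).2 = s)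
    (hmin : ∀ j ∈ al, ((f j).1 = e ∨ (f j).2 = s) → i ≤ j) :
    scanP s e (al.map f) =
      if (f i).1 = e then some (s, (f i).2, (al.filter (fun j => j != i)).map f)
      else some ((f i).1, e, (al.filter (fun j => j != i)).map f) := by
  induction al with
  | nil => simp at hi
  | cons a al' ih =>
    have hgt : ∀ j ∈ al', a < j := fun j hj => (List.pairwise_cons.mp hasc).1 j hj
    by_cases hma : (f a).1 = e ∨ (f a).2 = s
    · -- the head matches, so i = a
      have hia : i = a := by
        have hle := hmin a (by simp) hma
        rcases List.mem_cons.mp hi with h0 | hi'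
        · exact h0
        · exact absurd hle (by have := hgt i hi'; omega)
      subst hia
      have hfilter : al'.filter (fun j => j != i) = al' := by
        apply List.filter_eq_self.mpr
        intro j hj
        have := hgt j hj
        simp; omega
      rcases hfa : f i with ⟨c1, c2⟩
      simp only [List.map_cons, hfa, scanP]
      rw [hfa] at hma
      by_cases h1 : c1 = e
      · simp [h1, hfa, List.filter_cons, hfilter]
      · have h2 : c2 = s := by tauto
        simp [h1, h2, hfa, List.filter_cons, hfilter]
    · -- head does not match: recurse
      push_neg at hma
      obtain ⟨h1, h2⟩ := hma
      have hia : i ≠ a := by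
        intro hcon; rw [hcon] at hm; tauto
      have hi' : i ∈ al' := by
        rcases List.mem_cons.mp hi with h0 | hi'
        · exact absurd h0 hia
        · exact hi'
      have ihr := ih (List.Pairwise.sublist (List.sublist_cons_self a al') hasc) hi'
        (fun j hj hmj => hmin j (by simp [hj]) hmj)
      rcases hfa : f a with ⟨c1, c2⟩
      rw [hfa] at h1 h2
      simp only [List.map_cons, hfa, scanP, if_neg h1, if_neg h2]
      rw [ihr]
      have hfc : (a :: al').filter (fun j => j != i) = a :: al'.filter (fun j => j != i) := by
        simp [List.filter_cons, Ne.symm hia, hia]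
      rw [hfc]
      by_cases hie : (f i).1 = e <;> simp [hie, hfa]

theorem scanP_select (pairs : List (Char × Char)) (dead : List Nat) (s e : Char) (i : Nat)
    (hi : i ∈ aliveL pairs.length dead)
    (hm : (pAtB pairs i).1 = e ∨ (pAtB pairs i).2 = s)
    (hmin : ∀ j ∈ aliveL pairs.length dead, ((pAtB pairs j).1 = e ∨ (pAtB pairs j).2 = s) → i ≤ j) :
    scanP s e ((aliveL pairs.length dead).map (pAtB pairs)) =
      if (pAtB pairs i).1 = e
      then some (s, (pAtB pairs i).2, (aliveL pairs.length (dead ++ [i])).map (pAtB pairs))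
      else some ((pAtB pairs i).1, e, (aliveL pairs.length (dead ++ [i])).map (pAtB pairs)) := by
  rw [aliveL_add]
  exact scanP_min s e (pAtB pairs) (aliveL pairs.length dead) i (aliveL_pairwise _ _) hi hm hmin

theorem loopB_ref (r : Nat) : ∀ (pairs : List (Char × Char))
    (bs be : PySem.Dict Char (List Nat)) (dead : PySem.Set Nat) (s e : Char),
    (∀ c, GoodList pairs dead Prod.fst c (bs.getD c [])) →
    (∀ c, GoodList pairs dead Prod.snd c (be.getD c [])) →
    r = (aliveL pairs.length dead).length →
    loopB pairs bs be dead s e r = refLoop s e ((aliveL pairs.length dead).map (pAtB pairs)) := by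
  induction r with
  | zero =>
    intro pairs bs be dead s e _ _ hr
    have hnil : aliveL pairs.length dead = [] := List.eq_nil_of_length_eq_zero hr.symm
    rw [hnil]
    simp only [loopB, List.map_nil, refLoop_nil]
  | succ r ih =>
    intro pairs bs be dead s e hbs hbe hr
    have hNodup : (aliveL pairs.length dead).Nodup :=
      (aliveL_pairwise pairs.length dead).imp (fun h => Nat.ne_of_lt h)
    cases hal : aliveL pairs.length dead with
    | nil => rw [hal] at hr; simp at hr
    | cons a al' =>
    cases hF : (pruneB dead (bs.getD e [])).getLast? with
    | none =>
      cases hB : (pruneB dead (be.getD s [])).getLast? with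
      | none =>
        have hnone : scanP s e ((aliveL pairs.length dead).map (pAtB pairs)) = none := by
          apply scanP_none_of
          intro j hj
          rw [mem_aliveL] at hj
          constructor
          · intro hcon
            have hjL : j ∈ bs.getD e [] := (hbs e).2.2 j hj.1 hj.2.1 hj.2.2 hcon
            exact hj.2.2 (pruneB_none dead _ hF j hjL)
          · intro hcon
            have hjL : j ∈ be.getD s [] := (hbe s).2.2 j hj.1 hj.2.1 hj.2.2 hcon
            exact hj.2.2 (pruneB_none dead _ hB j hjL)
        rw [hal, List.map_cons] at hnone
        simp only [loopB, hF, hB, hal, List.map_cons]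
        rw [refLoop_cons_none _ _ _ _ hnone]
      | some j =>
        -- backward merge with piece j
        obtain ⟨hjL, hjd⟩ := pruneB_some dead _ j hB
        obtain ⟨hj1, hj2, hjs⟩ := (hbe s).2.1 j hjL
        have hjAlive : j ∈ aliveL pairs.length dead := (mem_aliveL _ _ _).mpr ⟨hj1, hj2, hjd⟩
        have hjne : (pAtB pairs j).1 ≠ e := by
          intro hcon
          have hjL' : j ∈ bs.getD e [] := (hbs e).2.2 j hj1 hj2 hjd hcon
          exact hjd (pruneB_none dead _ hF j hjL')
        have hmin : ∀ k ∈ aliveL pairs.length dead,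
            ((pAtB pairs k).1 = e ∨ (pAtB pairs k).2 = s) → j ≤ k := by
          intro k hk hmk
          rw [mem_aliveL] at hk
          rcases hmk with hke | hks
          · have hkL : k ∈ bs.getD e [] := (hbs e).2.2 k hk.1 hk.2.1 hk.2.2 hke
            exact absurd (pruneB_none dead _ hF k hkL) hk.2.2
          · have hkL : k ∈ be.getD s [] := (hbe s).2.2 k hk.1 hk.2.1 hk.2.2 hks
            exact pruneB_min dead _ j k (hbe s).1 hB hkL hk.2.2
        have hscan := scanP_select pairs dead s e j hjAlive (Or.inr hjs) hmin
        rw [if_neg hjne] at hscan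
        rw [hal, List.map_cons] at hscan
        simp only [loopB, hF, hB, hal, List.map_cons]
        rw [refLoop_cons_some _ _ _ _ _ _ _ hscan]
        rw [PySem.Set.add_of_not_mem hjd]
        refine ih pairs (bs.insert e (pruneB dead (bs.getD e []))) (be.insert s (pruneB dead (be.getD s [])).dropLast) (dead ++ [j]) (pAtB pairs j).1 e ?_ ?_ ?_
        · intro c
          rw [PySem.Dict.getD_insert]
          split
          · subst c
            exact GoodList_mono pairs dead (dead ++ [j]) Prod.fst e _
              (fun x hx => List.mem_append.mpr (Or.inl hx)) (GoodList_pruneB pairs dead _ e _ (hbs e))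
          · exact GoodList_mono pairs dead (dead ++ [j]) Prod.fst c _
              (fun x hx => List.mem_append.mpr (Or.inl hx)) (hbs c)
        · intro c
          rw [PySem.Dict.getD_insert]
          split
          · subst c
            exact GoodList_pop pairs dead Prod.snd s _ j (hbe s) hB
          · exact GoodList_mono pairs dead (dead ++ [j]) Prod.snd c _
              (fun x hx => List.mem_append.mpr (Or.inl hx)) (hbe c)
        · rw [aliveL_add]
          have := length_filter_ne (aliveL pairs.length dead) j hNodup hjAlive
          omega
    | some i =>
      obtain ⟨hiL, hid⟩ := pruneB_some dead _ i hF
      obtain ⟨hi1, hi2, hie⟩ := (hbs e).2.1 i hiL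
      have hiAlive : i ∈ aliveL pairs.length dead := (mem_aliveL _ _ _).mpr ⟨hi1, hi2, hid⟩
      cases hB : (pruneB dead (be.getD s [])).getLast? with
      | none =>
        have hmin : ∀ k ∈ aliveL pairs.length dead,
            ((pAtB pairs k).1 = e ∨ (pAtB pairs k).2 = s) → i ≤ k := by
          intro k hk hmk
          rw [mem_aliveL] at hk
          rcases hmk with hke | hks
          · have hkL : k ∈ bs.getD e [] := (hbs e).2.2 k hk.1 hk.2.1 hk.2.2 hke
            exact pruneB_min dead _ i k (hbs e).1 hF hkL hk.2.2
          · have hkL : k ∈ be.getD s [] := (hbe s).2.2 k hk.1 hk.2.1 hk.2.2 hks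
            exact absurd (pruneB_none dead _ hB k hkL) hk.2.2
        have hscan := scanP_select pairs dead s e i hiAlive (Or.inl hie) hmin
        rw [if_pos hie] at hscan
        rw [hal, List.map_cons] at hscan
        simp only [loopB, hF, hB, hal, List.map_cons]
        rw [refLoop_cons_some _ _ _ _ _ _ _ hscan]
        rw [PySem.Set.add_of_not_mem hid]
        refine ih pairs (bs.insert e (pruneB dead (bs.getD e [])).dropLast) (be.insert s (pruneB dead (be.getD s []))) (dead ++ [i]) s (pAtB pairs i).2 ?_ ?_ ?_
        · intro c
          rw [PySem.Dict.getD_insert]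
          split
          · subst c
            exact GoodList_pop pairs dead Prod.fst e _ i (hbs e) hF
          · exact GoodList_mono pairs dead (dead ++ [i]) Prod.fst c _
              (fun x hx => List.mem_append.mpr (Or.inl hx)) (hbs c)
        · intro c
          rw [PySem.Dict.getD_insert]
          split
          · subst c
            exact GoodList_mono pairs dead (dead ++ [i]) Prod.snd s _
              (fun x hx => List.mem_append.mpr (Or.inl hx)) (GoodList_pruneB pairs dead _ s _ (hbe s))
          · exact GoodList_mono pairs dead (dead ++ [i]) Prod.snd c _
              (fun x hx => List.mem_append.mpr (Or.inl hx)) (hbe c)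
        · rw [aliveL_add]
          have := length_filter_ne (aliveL pairs.length dead) i hNodup hiAlive
          omega
      | some j =>
        obtain ⟨hjL, hjd⟩ := pruneB_some dead _ j hB
        obtain ⟨hj1, hj2, hjs⟩ := (hbe s).2.1 j hjL
        have hjAlive : j ∈ aliveL pairs.length dead := (mem_aliveL _ _ _).mpr ⟨hj1, hj2, hjd⟩
        by_cases hij : i ≤ j
        · -- forward merge with piece i
          have hmin : ∀ k ∈ aliveL pairs.length dead,
              ((pAtB pairs k).1 = e ∨ (pAtB pairs k).2 = s) → i ≤ k := by
            intro k hk hmk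
            rw [mem_aliveL] at hk
            rcases hmk with hke | hks
            · have hkL : k ∈ bs.getD e [] := (hbs e).2.2 k hk.1 hk.2.1 hk.2.2 hke
              exact pruneB_min dead _ i k (hbs e).1 hF hkL hk.2.2
            · have hkL : k ∈ be.getD s [] := (hbe s).2.2 k hk.1 hk.2.1 hk.2.2 hks
              exact le_trans hij (pruneB_min dead _ j k (hbe s).1 hB hkL hk.2.2)
          have hscan := scanP_select pairs dead s e i hiAlive (Or.inl hie) hmin
          rw [if_pos hie] at hscan
          rw [hal, List.map_cons] at hscan
          simp only [loopB, hF, hB, hal, List.map_cons]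
          rw [if_pos hij]
          rw [refLoop_cons_some _ _ _ _ _ _ _ hscan]
          rw [PySem.Set.add_of_not_mem hid]
          refine ih pairs (bs.insert e (pruneB dead (bs.getD e [])).dropLast) (be.insert s (pruneB dead (be.getD s []))) (dead ++ [i]) s (pAtB pairs i).2 ?_ ?_ ?_
          · intro c
            rw [PySem.Dict.getD_insert]
            split
            · subst c
              exact GoodList_pop pairs dead Prod.fst e _ i (hbs e) hF
            · exact GoodList_mono pairs dead (dead ++ [i]) Prod.fst c _
                (fun x hx => List.mem_append.mpr (Or.inl hx)) (hbs c)
          · intro c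
            rw [PySem.Dict.getD_insert]
            split
            · subst c
              exact GoodList_mono pairs dead (dead ++ [i]) Prod.snd s _
                (fun x hx => List.mem_append.mpr (Or.inl hx)) (GoodList_pruneB pairs dead _ s _ (hbe s))
            · exact GoodList_mono pairs dead (dead ++ [i]) Prod.snd c _
                (fun x hx => List.mem_append.mpr (Or.inl hx)) (hbe c)
          · rw [aliveL_add]
            have := length_filter_ne (aliveL pairs.length dead) i hNodup hiAlive
            omega
        · -- backward merge with piece j (j < i)
          have hjne : (pAtB pairs j).1 ≠ e := by
            intro hcon
            have hjL' : j ∈ bs.getD e [] := (hbs e).2.2 j hj1 hj2 hjd hcon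
            exact hij (pruneB_min dead _ i j (hbs e).1 hF hjL' hjd)
          have hmin : ∀ k ∈ aliveL pairs.length dead,
              ((pAtB pairs k).1 = e ∨ (pAtB pairs k).2 = s) → j ≤ k := by
            intro k hk hmk
            rw [mem_aliveL] at hk
            rcases hmk with hke | hks
            · have hkL : k ∈ bs.getD e [] := (hbs e).2.2 k hk.1 hk.2.1 hk.2.2 hke
              have := pruneB_min dead _ i k (hbs e).1 hF hkL hk.2.2
              omega
            · have hkL : k ∈ be.getD s [] := (hbe s).2.2 k hk.1 hk.2.1 hk.2.2 hks
              exact pruneB_min dead _ j k (hbe s).1 hB hkL hk.2.2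
          have hscan := scanP_select pairs dead s e j hjAlive (Or.inr hjs) hmin
          rw [if_neg hjne] at hscan
          rw [hal, List.map_cons] at hscan
          simp only [loopB, hF, hB, hal, List.map_cons]
          rw [if_neg hij]
          rw [refLoop_cons_some _ _ _ _ _ _ _ hscan]
          rw [PySem.Set.add_of_not_mem hjd]
          refine ih pairs (bs.insert e (pruneB dead (bs.getD e []))) (be.insert s (pruneB dead (be.getD s [])).dropLast) (dead ++ [j]) (pAtB pairs j).1 e ?_ ?_ ?_
          · intro c
            rw [PySem.Dict.getD_insert]
            split
            · subst c
              exact GoodList_mono pairs dead (dead ++ [j]) Prod.fst e _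
                (fun x hx => List.mem_append.mpr (Or.inl hx)) (GoodList_pruneB pairs dead _ e _ (hbs e))
            · exact GoodList_mono pairs dead (dead ++ [j]) Prod.fst c _
                (fun x hx => List.mem_append.mpr (Or.inl hx)) (hbs c)
          · intro c
            rw [PySem.Dict.getD_insert]
            split
            · subst c
              exact GoodList_pop pairs dead Prod.snd s _ j (hbe s) hB
            · exact GoodList_mono pairs dead (dead ++ [j]) Prod.snd c _
                (fun x hx => List.mem_append.mpr (Or.inl hx)) (hbe c)
          · rw [aliveL_add]
            have := length_filter_ne (aliveL pairs.length dead) j hNodup hjAlive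
            omega

theorem mem_ridxB (n : Nat) (i : Nat) : i ∈ ridxB n ↔ 1 ≤ i ∧ i < n := by
  simp only [ridxB, List.mem_reverse, List.range_eq_range', List.drop_range', List.mem_range']
  constructor
  · rintro ⟨k, hk, rfl⟩; omega
  · rintro ⟨h1, h2⟩; exact ⟨i - 1, by omega, by omega⟩

theorem ridxB_pairwise (n : Nat) : (ridxB n).Pairwise (· > ·) := by
  unfold ridxB
  rw [List.pairwise_reverse]
  exact List.Pairwise.sublist (List.drop_sublist 1 _) List.pairwise_lt_range

theorem buckets_fst (pairs : List (Char × Char)) (c : Char) :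
    (bucketsB pairs).1.getD c [] =
      (ridxB pairs.length).filter (fun i => (pAtB pairs i).1 == c) := by
  unfold bucketsB
  have hsplit : (ridxB pairs.length).foldl
      (fun d i => (d.1.modify (pAtB pairs i).1 [] (· ++ [i]),
                   d.2.modify (pAtB pairs i).2 [] (· ++ [i])))
      (PySem.Dict.empty, PySem.Dict.empty)
      = ((ridxB pairs.length).foldl (fun d i => d.modify (pAtB pairs i).1 [] (· ++ [i])) PySem.Dict.empty,
         (ridxB pairs.length).foldl (fun d i => d.modify (pAtB pairs i).2 [] (· ++ [i])) PySem.Dict.empty) :=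
    PySem.List.foldl_prod_mk
      (fun (d : PySem.Dict Char (List Nat)) (i : Nat) => d.modify (pAtB pairs i).1 [] (· ++ [i]))
      (fun (d : PySem.Dict Char (List Nat)) (i : Nat) => d.modify (pAtB pairs i).2 [] (· ++ [i]))
      (ridxB pairs.length) PySem.Dict.empty PySem.Dict.empty
  rw [hsplit]
  have hfold : (ridxB pairs.length).foldl
      (fun d i => d.modify (pAtB pairs i).1 [] (· ++ [i])) PySem.Dict.empty
      = ((ridxB pairs.length).map (fun i => ((pAtB pairs i).1, i))).foldl
          (fun d p => d.modify p.1 [] (· ++ [p.2])) PySem.Dict.empty := by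
    rw [List.foldl_map]
  simp only [hfold, PySem.Dict.getD_foldl_modify_append, PySem.Dict.getD_empty,
    List.filter_map, List.map_map, List.nil_append]
  rw [show ((fun (x : Char × Nat) => x.2) ∘ fun i => ((pAtB pairs i).1, i)) = (fun i => i) from rfl,
      show ((fun (p : Char × Nat) => p.1 == c) ∘ fun i => ((pAtB pairs i).1, i))
        = (fun i => (pAtB pairs i).1 == c) from rfl,
      List.map_id']

theorem buckets_snd (pairs : List (Char × Char)) (c : Char) :
    (bucketsB pairs).2.getD c [] =
      (ridxB pairs.length).filter (fun i => (pAtB pairs i).2 == c) := by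
  unfold bucketsB
  have hsplit : (ridxB pairs.length).foldl
      (fun d i => (d.1.modify (pAtB pairs i).1 [] (· ++ [i]),
                   d.2.modify (pAtB pairs i).2 [] (· ++ [i])))
      (PySem.Dict.empty, PySem.Dict.empty)
      = ((ridxB pairs.length).foldl (fun d i => d.modify (pAtB pairs i).1 [] (· ++ [i])) PySem.Dict.empty,
         (ridxB pairs.length).foldl (fun d i => d.modify (pAtB pairs i).2 [] (· ++ [i])) PySem.Dict.empty) :=
    PySem.List.foldl_prod_mk
      (fun (d : PySem.Dict Char (List Nat)) (i : Nat) => d.modify (pAtB pairs i).1 [] (· ++ [i]))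
      (fun (d : PySem.Dict Char (List Nat)) (i : Nat) => d.modify (pAtB pairs i).2 [] (· ++ [i]))
      (ridxB pairs.length) PySem.Dict.empty PySem.Dict.empty
  rw [hsplit]
  have hfold : (ridxB pairs.length).foldl
      (fun d i => d.modify (pAtB pairs i).2 [] (· ++ [i])) PySem.Dict.empty
      = ((ridxB pairs.length).map (fun i => ((pAtB pairs i).2, i))).foldl
          (fun d p => d.modify p.1 [] (· ++ [p.2])) PySem.Dict.empty := by
    rw [List.foldl_map]
  simp only [hfold, PySem.Dict.getD_foldl_modify_append, PySem.Dict.getD_empty,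
    List.filter_map, List.map_map, List.nil_append]
  rw [show ((fun (x : Char × Nat) => x.2) ∘ fun i => ((pAtB pairs i).2, i)) = (fun i => i) from rfl,
      show ((fun (p : Char × Nat) => p.1 == c) ∘ fun i => ((pAtB pairs i).2, i))
        = (fun i => (pAtB pairs i).2 == c) from rfl,
      List.map_id']

theorem good_init (pairs : List (Char × Char)) (proj : Char × Char → Char) (c : Char) :
    GoodList pairs [] proj c ((ridxB pairs.length).filter (fun i => proj (pAtB pairs i) == c)) := by
  refine ⟨List.Pairwise.filter _ (ridxB_pairwise pairs.length), ?_, ?_⟩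
  · intro i hi
    rw [List.mem_filter] at hi
    obtain ⟨h1, h2⟩ := (mem_ridxB pairs.length i).mp hi.1
    exact ⟨h1, h2, by simpa using hi.2⟩
  · intro i h1 h2 _ h4
    rw [List.mem_filter]
    exact ⟨(mem_ridxB pairs.length i).mpr ⟨h1, h2⟩, by simpa using h4⟩

theorem aliveL_empty (n : Nat) : aliveL n [] = (List.range n).drop 1 := by
  simp [aliveL]

theorem aliveL_map_empty (pairs : List (Char × Char)) :
    (aliveL pairs.length []).map (pAtB pairs) = pairs.drop 1 := by
  rw [aliveL_empty]
  apply List.ext_getElem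
  · simp
  · intro k h1 h2
    simp only [List.getElem_map, List.getElem_drop, List.getElem_range, pAtB]
    rw [List.getD_eq_getElem]

theorem alt_eq_ref (h : String) (rest : List String) :
    rec_alt (h :: rest) = refLoop (fcB h) (lcB h) (rest.map (fun t => (fcB t, lcB t))) := by
  show loopB (pairsB (h :: rest)) (bucketsB (pairsB (h :: rest))).1 (bucketsB (pairsB (h :: rest))).2
      PySem.Set.empty (pAtB (pairsB (h :: rest)) 0).1 (pAtB (pairsB (h :: rest)) 0).2
      ((pairsB (h :: rest)).length - 1) = _
  rw [loopB_ref ((pairsB (h :: rest)).length - 1) (pairsB (h :: rest)) _ _ PySem.Set.empty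
      (pAtB (pairsB (h :: rest)) 0).1 (pAtB (pairsB (h :: rest)) 0).2
      (fun c => by
        rw [buckets_fst]
        simpa only [show (PySem.Set.empty : PySem.Set Nat) = [] from rfl]
          using good_init (pairsB (h :: rest)) Prod.fst c)
      (fun c => by
        rw [buckets_snd]
        simpa only [show (PySem.Set.empty : PySem.Set Nat) = [] from rfl]
          using good_init (pairsB (h :: rest)) Prod.snd c)
      (by
        simp only [show (PySem.Set.empty : PySem.Set Nat) = [] from rfl]
        rw [aliveL_empty]; simp [pairsB])]
  simp only [show (PySem.Set.empty : PySem.Set Nat) = [] from rfl]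
  rw [aliveL_map_empty]
  have hp0 : pAtB (pairsB (h :: rest)) 0 = (fcB h, lcB h) := by simp [pairsB, pAtB]
  have hdrop : (pairsB (h :: rest)).drop 1 = rest.map (fun t => (fcB t, lcB t)) := by
    simp [pairsB]
  rw [hp0, hdrop]

-- ===== VERDICT (by name: the statement is the Claim_ definition above) =====
theorem rec_spec : Claim_equal_rec := by
  intro lst _ _
  unfold Spec_rec
  cases lst with
  | nil => simp [rec.eq_def, rec_alt]
  | cons h rest =>
    rw [rec_eq_ref rest.length h rest rfl, alt_eq_ref h rest]
    rfl
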